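-- pv_equiv track=rewrite | github.com/CRadley/Advent-of-Code-2022 | day15.py | part_one
-- ===== SOURCE A (Python) =====
-- def manhatten_distance(x1, y1, x2, y2):
--     return abs(x1 - x2) + abs(y1 - y2)
--
-- def determine_invalid_points(min_x, max_x, md, sx, sy, target_y):
--     points = {}
--     for x in range(min_x, max_x + 1):
--         if md >= manhatten_distance(sx, sy, x, target_y):
--             points[(x, target_y)] = 0
--     return points
--
-- def part_one(positions, debug):
--     invalid_points = []
--     for sx, sy, bx, by in positions:
--         md = manhatten_distance(sx, sy, bx, by)
--         max_x = sx + md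
--         min_x = sx - md
--         potential_points = determine_invalid_points(
--             min_x, max_x, md, sx, sy, debug)
--         invalid_points.extend(list(filter(lambda point: point != (
--             sx, sy) and point != (bx, by), potential_points)))
--     invalid_points = list(set(invalid_points))
--     points = [ip for ip in invalid_points if ip[1] == debug]
--     return len(points)
-- ===== SOURCE B (Python) =====
-- def part_one(positions, debug):
--     # Collect per-sensor coverage on the target row as intervals, splitting out
--     # the sensor/beacon points that sensor's own filter removes, then sweep the
--     # sorted intervals once to count the covered integers.
--     segments = []
--     for sx, sy, bx, by in positions:
--         r = abs(sx - bx) + abs(sy - by) - abs(sy - debug)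
--         if r < 0:
--             continue
--         segs = [(sx - r, sx + r)]
--         holes = []
--         if sy == debug:
--             holes.append(sx)
--         if by == debug:
--             holes.append(bx)
--         for h in holes:
--             nxt = []
--             for a, b in segs:
--                 if a <= h <= b:
--                     if a <= h - 1:
--                         nxt.append((a, h - 1))
--                     if h + 1 <= b:
--                         nxt.append((h + 1, b))
--                 else:
--                     nxt.append((a, b))
--             segs = nxt
--         segments.extend(segs)
--     segments.sort(key=lambda s: s[0])
--     total = 0
--     cur = None
--     for a, b in segments:
--         if cur is None:
--             cur = (a, b)
--         elif a <= cur[1] + 1: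
--             cur = (cur[0], max(cur[1], b))
--         else:
--             total += cur[1] - cur[0] + 1
--             cur = (a, b)
--     if cur is not None:
--         total += cur[1] - cur[0] + 1
--     return total
-- ===== Notes on version B (the rewrite author's own statement) =====
-- stated objective: faster
-- what changed: A enumerates every x in each sensor's full range into a per-sensor dict, filters the points and deduplicates the concatenated point lists with a set; B computes each sensor's coverage interval on the target row, splits out the sensor/beacon points, and counts the covered integers with one sort + sweep over the intervals.
import Mathlib
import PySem

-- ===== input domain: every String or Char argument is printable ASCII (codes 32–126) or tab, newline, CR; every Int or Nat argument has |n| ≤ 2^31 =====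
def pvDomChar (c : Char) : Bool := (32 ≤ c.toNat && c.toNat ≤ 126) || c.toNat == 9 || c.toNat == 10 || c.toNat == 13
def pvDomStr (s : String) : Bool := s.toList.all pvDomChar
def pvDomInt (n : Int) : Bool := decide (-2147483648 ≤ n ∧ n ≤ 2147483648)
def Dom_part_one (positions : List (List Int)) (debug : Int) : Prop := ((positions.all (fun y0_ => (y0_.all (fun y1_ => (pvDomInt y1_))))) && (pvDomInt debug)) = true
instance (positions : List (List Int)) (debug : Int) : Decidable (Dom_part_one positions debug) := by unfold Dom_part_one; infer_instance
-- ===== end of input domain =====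

-- B replaces A's per-cell dict scan of each sensor's whole x-range by per-sensor
-- intervals on the target row (sensor/beacon points split out) merged in one sorted sweep.

-- ===== PORT A =====
def manhatten_distance (x1 y1 x2 y2 : Int) : Int :=
  |x1 - x2| + |y1 - y2|

def determine_invalid_points (min_x max_x md sx sy target_y : Int) :
    PySem.Dict (Int × Int) Int :=
  (PySem.List.pyRange min_x (max_x + 1)).foldl
    (fun points x =>
      if md ≥ manhatten_distance sx sy x target_y then points.insert (x, target_y) 0
      else points)
    ⟨[]⟩

def part_one (positions : List (List Int)) (debug : Int) : Int :=
  -- a row that is not a 4-element list makes Python's unpacking raise; Pre_ excludes those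
  let invalid_points := positions.foldl
    (fun invalid_points row =>
      match row with
      | [sx, sy, bx, by_] =>
        let md := manhatten_distance sx sy bx by_
        let max_x := sx + md
        let min_x := sx - md
        let potential_points := determine_invalid_points min_x max_x md sx sy debug
        invalid_points ++
          (potential_points.keys.filter
            (fun point => !(point == (sx, sy)) && !(point == (bx, by_))))
      | _ => invalid_points) []
  let invalid_points := PySem.Set.ofList invalid_points
  let points := invalid_points.filter (fun ip => ip.2 == debug)
  (points.length : Int)

-- ===== PORT B =====
-- tuple unpacking 'sx, sy, bx, by = row' (a non-4-row raises in Python; Pre_ excludes it)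
def pvUnpack4 {α : Type} (row : List Int) (dflt : α) (f : Int → Int → Int → Int → α) : α :=
  List.casesOn row dflt fun sx r1 =>
    List.casesOn r1 dflt fun sy r2 =>
      List.casesOn r2 dflt fun bx r3 =>
        List.casesOn r3 dflt fun by_ r4 =>
          List.casesOn r4 (f sx sy bx by_) fun _ _ => dflt

-- the body of B's inner splitting loop ('for a, b in segs: …')
def pvSplitStep (h : Int) (nxt : List (Int × Int)) (ab : Int × Int) : List (Int × Int) :=
  if ab.1 ≤ h ∧ h ≤ ab.2 then
    let nxt := if ab.1 ≤ h - 1 then nxt ++ [(ab.1, h - 1)] else nxt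
    if h + 1 ≤ ab.2 then nxt ++ [(h + 1, ab.2)] else nxt
  else nxt ++ [ab]

-- the body of B's sweep loop ('for a, b in segments: …'; state = (total, cur))
def pvSweepStep (st : Int × Option (Int × Int)) (ab : Int × Int) : Int × Option (Int × Int) :=
  match st.2 with
  | none => (st.1, some ab)
  | some c =>
    if ab.1 ≤ c.2 + 1 then (st.1, some (c.1, max c.2 ab.2))
    else (st.1 + (c.2 - c.1 + 1), some ab)

-- B's close-out after the sweep loop
def pvSweepFinish (st : Int × Option (Int × Int)) : Int :=
  match st.2 with
  | none => st.1
  | some c => st.1 + (c.2 - c.1 + 1)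

def part_one_alt (positions : List (List Int)) (debug : Int) : Int :=
  let segments := positions.foldl
    (fun segments row =>
      pvUnpack4 row segments (fun sx sy bx by_ =>
        let r := |sx - bx| + |sy - by_| - |sy - debug|
        if r < 0 then segments
        else
          let segs := [(sx - r, sx + r)]
          let holes : List Int := []
          let holes := if sy = debug then holes ++ [sx] else holes
          let holes := if by_ = debug then holes ++ [bx] else holes
          let segs := holes.foldl (fun segs h => segs.foldl (pvSplitStep h) []) segs
          segments ++ segs)) []
  let segments := PySem.List.sorted segments (fun s => s.1)
  pvSweepFinish (segments.foldl pvSweepStep (0, none))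

-- ===== PRECONDITION & SPEC =====
-- Pre_ excludes exactly the inputs on which A raises: a row that is not a
-- 4-element list makes Python's tuple unpacking raise ValueError (B raises too).
def Pre_part_one (positions : List (List Int)) (debug : Int) : Prop :=
  ∀ row ∈ positions, row.length = 4
instance (positions : List (List Int)) (debug : Int) : Decidable (Pre_part_one positions debug) := by
  unfold Pre_part_one; infer_instance

def pvWitness_part_one : List (List Int) × Int := ([[2, 0, 6, 3], [0, 1, 0, 1]], 1)

def Spec_part_one (positions : List (List Int)) (debug : Int) (out : Int) : Prop :=
  out = part_one_alt positions debug
instance (positions : List (List Int)) (debug : Int) (out : Int) : Decidable (Spec_part_one positions debug out) := by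
  unfold Spec_part_one; infer_instance

-- ===== CLAIM (what is proved, stated in full; the proofs are below) =====
def Claim_equal_part_one : Prop :=
  ∀ (positions : List (List Int)) (debug : Int), Dom_part_one positions debug →
    Pre_part_one positions debug → Spec_part_one positions debug (part_one positions debug)

-- ===== LEMMAS AND PROOFS =====

-- the (x, debug) pairs one row contributes in A's loop (empty for non-4-rows)
def pvLA (debug : Int) (row : List Int) : List (Int × Int) :=
  match row with
  | [sx, sy, bx, by_] =>
    let md := manhatten_distance sx sy bx by_
    (determine_invalid_points (sx - md) (sx + md) md sx sy debug).keys.filter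
      (fun point => !(point == (sx, sy)) && !(point == (bx, by_)))
  | _ => []

def pvHoles (debug sx sy bx by_ : Int) : List Int :=
  (if sy = debug then [sx] else []) ++ (if by_ = debug then [bx] else [])

-- the intervals one row contributes in B's loop (empty for non-4-rows)
def pvSegsRow (debug : Int) (row : List Int) : List (Int × Int) :=
  match row with
  | [sx, sy, bx, by_] =>
    if |sx - bx| + |sy - by_| - |sy - debug| < 0 then []
    else
      (pvHoles debug sx sy bx by_).foldl (fun segs h => segs.foldl (pvSplitStep h) [])
        [(sx - (|sx - bx| + |sy - by_| - |sy - debug|),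
          sx + (|sx - bx| + |sy - by_| - |sy - debug|))]
  | _ => []

-- what one interval becomes when the hole h is removed from it
def pvPieces (h : Int) (ab : Int × Int) : List (Int × Int) :=
  if ab.1 ≤ h ∧ h ≤ ab.2 then
    (if ab.1 ≤ h - 1 then [(ab.1, h - 1)] else []) ++
    (if h + 1 ≤ ab.2 then [(h + 1, ab.2)] else [])
  else [ab]

-- "x is covered by some interval of L"
def pvInU (L : List (Int × Int)) (x : Int) : Prop := ∃ p ∈ L, p.1 ≤ x ∧ x ≤ p.2

-- computable Finset.Icc on Int
def pvIcc (a b : Int) : Finset Int := (PySem.List.pyRange a (b + 1)).toFinset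

-- the finset covered by the intervals of L
def pvFU (L : List (Int × Int)) : Finset Int :=
  L.foldr (fun p acc => pvIcc p.1 p.2 ∪ acc) ∅

theorem mem_pvIcc (a b x : Int) : x ∈ pvIcc a b ↔ a ≤ x ∧ x ≤ b := by
  simp only [pvIcc, List.mem_toFinset, PySem.List.mem_pyRange_one]
  omega

theorem pvIcc_eq_Icc (a b : Int) : pvIcc a b = Finset.Icc a b := by
  ext x; rw [mem_pvIcc, Finset.mem_Icc]

theorem mem_pvFU (L : List (Int × Int)) (x : Int) : x ∈ pvFU L ↔ pvInU L x := by
  induction L with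
  | nil => simp [pvFU, pvInU]
  | cons p t ih =>
    show x ∈ pvIcc p.1 p.2 ∪ pvFU t ↔ _
    rw [Finset.mem_union, mem_pvIcc, ih]
    simp [pvInU]

theorem mem_keys_insert {k0 k : Int × Int} {v : Int} (d : PySem.Dict (Int × Int) Int) :
    k ∈ (d.insert k0 v).keys ↔ k ∈ d.keys ∨ k = k0 := by
  simp only [PySem.Dict.insert, PySem.Dict.contains]
  split_ifs with hc
  · simp only [List.any_eq_true, beq_iff_eq] at hc
    obtain ⟨p0, hp0, hk0⟩ := hc
    simp only [PySem.Dict.keys, List.map_map, List.mem_map, Function.comp]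
    constructor
    · rintro ⟨p, hp, hpk⟩
      by_cases h : p.1 = k0
      · right; simp [h] at hpk; exact hpk.symm
      · left; simp [h] at hpk; exact ⟨p, hp, hpk⟩
    · rintro (⟨p, hp, hpk⟩ | rfl)
      · by_cases h : p.1 = k0
        · refine ⟨p0, hp0, ?_⟩; simp only [hk0, BEq.rfl, if_true]; rw [← hpk, ← h]
        · refine ⟨p, hp, ?_⟩
          rw [if_neg (by simpa using h)]
          exact hpk
      · exact ⟨p0, hp0, by simp [hk0]⟩
  · simp [PySem.Dict.keys]

theorem mem_keys_foldl (xs : List Int) (md sx sy ty t : Int)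
    (d : PySem.Dict (Int × Int) Int) (k : Int × Int) :
    k ∈ (xs.foldl (fun points x =>
        if md ≥ manhatten_distance sx sy x ty then points.insert (x, t) 0 else points)
        d).keys ↔
      k ∈ d.keys ∨ ∃ x ∈ xs, md ≥ manhatten_distance sx sy x ty ∧ k = (x, t) := by
  induction xs generalizing d with
  | nil => simp
  | cons a xs ih =>
    simp only [List.foldl_cons]
    by_cases hc : md ≥ manhatten_distance sx sy a ty
    · rw [if_pos hc, ih, mem_keys_insert]
      constructor
      · rintro ((h | rfl) | ⟨x, hx, hcx, rfl⟩)
        · exact Or.inl h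
        · exact Or.inr ⟨a, by simp, hc, rfl⟩
        · exact Or.inr ⟨x, by simp [hx], hcx, rfl⟩
      · rintro (h | ⟨x, hx, hcx, rfl⟩)
        · exact Or.inl (Or.inl h)
        · rcases List.mem_cons.mp hx with rfl | hx
          · exact Or.inl (Or.inr rfl)
          · exact Or.inr ⟨x, hx, hcx, rfl⟩
    · rw [if_neg hc, ih]
      constructor
      · rintro (h | ⟨x, hx, hcx, rfl⟩)
        · exact Or.inl h
        · exact Or.inr ⟨x, by simp [hx], hcx, rfl⟩
      · rintro (h | ⟨x, hx, hcx, rfl⟩)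
        · exact Or.inl h
        · rcases List.mem_cons.mp hx with rfl | hx
          · exact absurd hcx hc
          · exact Or.inr ⟨x, hx, hcx, rfl⟩

theorem mem_keys_det (min_x max_x md sx sy ty : Int) (k : Int × Int) :
    k ∈ (determine_invalid_points min_x max_x md sx sy ty).keys ↔
      ∃ x ∈ PySem.List.pyRange min_x (max_x + 1),
        md ≥ manhatten_distance sx sy x ty ∧ k = (x, ty) := by
  unfold determine_invalid_points
  rw [mem_keys_foldl]
  simp [PySem.Dict.keys]

theorem mem_pvLA (debug sx sy bx by_ x y : Int) :
    (x, y) ∈ pvLA debug [sx, sy, bx, by_] ↔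
      (y = debug ∧
       manhatten_distance sx sy x debug ≤ manhatten_distance sx sy bx by_ ∧
       ¬(x = sx ∧ y = sy) ∧ ¬(x = bx ∧ y = by_)) := by
  show _ ∈ List.filter _ _ ↔ _
  rw [List.mem_filter, mem_keys_det]
  constructor
  · rintro ⟨⟨x', hxr, hdist, hk⟩, hb⟩
    have hx : x = x' := congrArg Prod.fst hk
    have hy : y = debug := congrArg Prod.snd hk
    refine ⟨hy, ?_, ?_, ?_⟩
    · rw [hx]; exact hdist
    · rintro ⟨ha, hbb⟩
      rw [show ((x, y) : Int × Int) = (sx, sy) from by rw [ha, hbb]] at hb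
      simp at hb
    · rintro ⟨ha, hbb⟩
      rw [show ((x, y) : Int × Int) = (bx, by_) from by rw [ha, hbb]] at hb
      simp at hb
  · rintro ⟨hy, hdist, h1, h2⟩
    have hne1 : ((x, y) : Int × Int) ≠ (sx, sy) := fun he =>
      h1 ⟨congrArg Prod.fst he, congrArg Prod.snd he⟩
    have hne2 : ((x, y) : Int × Int) ≠ (bx, by_) := fun he =>
      h2 ⟨congrArg Prod.fst he, congrArg Prod.snd he⟩
    refine ⟨⟨x, ?_, hdist, by rw [hy]⟩, by simp [hne1, hne2]⟩
    rw [PySem.List.mem_pyRange_one]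
    have h3 := abs_nonneg (sy - debug)
    simp only [manhatten_distance, Int.abs_eq_natAbs] at hdist ⊢
    omega

theorem foldl_pvSplitStep (h : Int) (segs : List (Int × Int)) :
    segs.foldl (pvSplitStep h) [] = segs.flatMap (pvPieces h) := by
  have he : pvSplitStep h = fun nxt ab => nxt ++ pvPieces h ab := by
    funext nxt ab
    simp only [pvSplitStep, pvPieces]
    split_ifs <;> simp
  rw [he, PySem.List.foldl_append_eq_flatMap, List.nil_append]

theorem inU_pieces (h : Int) (ab : Int × Int) (x : Int) :
    (∃ p ∈ pvPieces h ab, p.1 ≤ x ∧ x ≤ p.2) ↔ (ab.1 ≤ x ∧ x ≤ ab.2 ∧ x ≠ h) := by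
  simp only [pvPieces]
  split_ifs with h1 h2 h3 <;> simp <;> omega

theorem inU_flatMap_pieces (h : Int) (segs : List (Int × Int)) (x : Int) :
    pvInU (segs.flatMap (pvPieces h)) x ↔ pvInU segs x ∧ x ≠ h := by
  simp only [pvInU, List.mem_flatMap]
  constructor
  · rintro ⟨p, ⟨ab, hab, hp⟩, hx⟩
    have := (inU_pieces h ab x).mp ⟨p, hp, hx⟩
    exact ⟨⟨ab, hab, this.1, this.2.1⟩, this.2.2⟩
  · rintro ⟨⟨ab, hab, hx1, hx2⟩, hne⟩
    obtain ⟨p, hp, hx⟩ := (inU_pieces h ab x).mpr ⟨hx1, hx2, hne⟩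
    exact ⟨p, ⟨ab, hab, hp⟩, hx⟩

theorem ne_pieces (h : Int) (ab : Int × Int) (hab : ab.1 ≤ ab.2) :
    ∀ p ∈ pvPieces h ab, p.1 ≤ p.2 := by
  intro p hp
  simp only [pvPieces] at hp
  split_ifs at hp with h1 h2 h3 <;> simp at hp <;>
    (rcases hp with rfl | rfl <;> (try simp) <;> omega)

theorem ne_flatMap_pieces (h : Int) (segs : List (Int × Int))
    (h0 : ∀ p ∈ segs, p.1 ≤ p.2) :
    ∀ p ∈ segs.flatMap (pvPieces h), p.1 ≤ p.2 := by
  intro p hp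
  rw [List.mem_flatMap] at hp
  obtain ⟨ab, hab, hp⟩ := hp
  exact ne_pieces h ab (h0 ab hab) p hp

theorem inU_holes (holes : List Int) (segs : List (Int × Int)) (x : Int) :
    pvInU (holes.foldl (fun segs h => segs.foldl (pvSplitStep h) []) segs) x ↔
      pvInU segs x ∧ ∀ h ∈ holes, x ≠ h := by
  induction holes generalizing segs with
  | nil => simp
  | cons h hs ih =>
    rw [List.foldl_cons, foldl_pvSplitStep, ih, inU_flatMap_pieces]
    constructor
    · rintro ⟨⟨h1, h2⟩, h3⟩
      refine ⟨h1, ?_⟩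
      rintro h' hm
      rcases List.mem_cons.mp hm with rfl | hm
      · exact h2
      · exact h3 h' hm
    · rintro ⟨h1, h2⟩
      exact ⟨⟨h1, h2 h (by simp)⟩, fun h' hm => h2 h' (by simp [hm])⟩

theorem ne_holes (holes : List Int) (segs : List (Int × Int))
    (h0 : ∀ p ∈ segs, p.1 ≤ p.2) :
    ∀ p ∈ holes.foldl (fun segs h => segs.foldl (pvSplitStep h) []) segs, p.1 ≤ p.2 := by
  induction holes generalizing segs with
  | nil => exact h0
  | cons h hs ih =>
    rw [List.foldl_cons, foldl_pvSplitStep]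
    exact ih _ (ne_flatMap_pieces h segs h0)

theorem ne_pvSegsRow (debug : Int) (row : List Int) :
    ∀ p ∈ pvSegsRow debug row, p.1 ≤ p.2 := by
  rcases row with _ | ⟨sx, _ | ⟨sy, _ | ⟨bx, _ | ⟨by_, _ | ⟨e, t⟩⟩⟩⟩⟩ <;>
    try (intro p hp; simp [pvSegsRow] at hp; done)
  simp only [pvSegsRow]
  split_ifs with hr
  · intro p hp; simp at hp
  · refine ne_holes _ _ ?_
    intro p hp
    simp only [List.mem_singleton] at hp
    subst hp
    simp only
    omega

theorem holes_cond (debug sx sy bx by_ x : Int) :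
    (∀ h ∈ pvHoles debug sx sy bx by_, x ≠ h) ↔
      ((sy = debug → x ≠ sx) ∧ (by_ = debug → x ≠ bx)) := by
  unfold pvHoles
  split_ifs with h1 h2 h2 <;> simp [h1, h2]

theorem row_equiv (debug sx sy bx by_ x y : Int) :
    (x, y) ∈ pvLA debug [sx, sy, bx, by_] ↔
      y = debug ∧ pvInU (pvSegsRow debug [sx, sy, bx, by_]) x := by
  rw [mem_pvLA debug sx sy bx by_ x y]
  have hIn : pvInU (pvSegsRow debug [sx, sy, bx, by_]) x ↔
      ((¬ (|sx - bx| + |sy - by_| - |sy - debug| < 0)) ∧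
       sx - (|sx - bx| + |sy - by_| - |sy - debug|) ≤ x ∧
       x ≤ sx + (|sx - bx| + |sy - by_| - |sy - debug|)) ∧
      ((sy = debug → x ≠ sx) ∧ (by_ = debug → x ≠ bx)) := by
    simp only [pvSegsRow]
    split_ifs with hr
    · constructor
      · rintro ⟨p, hp, _⟩; simp at hp
      · rintro ⟨⟨hr', _⟩, _⟩; exact absurd hr hr'
    · rw [inU_holes, holes_cond]
      constructor
      · rintro ⟨⟨p, hp, h1, h2⟩, hh⟩
        simp only [List.mem_singleton] at hp
        subst hp
        exact ⟨⟨hr, h1, h2⟩, hh⟩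
      · rintro ⟨⟨_, h1, h2⟩, hh⟩
        exact ⟨⟨_, List.mem_singleton.mpr rfl, h1, h2⟩, hh⟩
  rw [hIn]
  constructor
  · rintro ⟨rfl, hdist, h1, h2⟩
    refine ⟨rfl, ⟨?_, ?_, ?_⟩, ?_, ?_⟩
    · simp only [manhatten_distance, Int.abs_eq_natAbs] at hdist ⊢
      omega
    · simp only [manhatten_distance, Int.abs_eq_natAbs] at hdist ⊢; omega
    · simp only [manhatten_distance, Int.abs_eq_natAbs] at hdist ⊢; omega
    · intro hsy hxs; exact h1 ⟨hxs, hsy.symm⟩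
    · intro hby hxb; exact h2 ⟨hxb, hby.symm⟩
  · rintro ⟨rfl, ⟨hr, hlo, hhi⟩, hh1, hh2⟩
    refine ⟨rfl, ?_, ?_, ?_⟩
    · simp only [manhatten_distance, Int.abs_eq_natAbs] at hr hlo hhi ⊢; omega
    · rintro ⟨hxs, hsy⟩; exact hh1 hsy.symm hxs
    · rintro ⟨hxb, hby⟩; exact hh2 hby.symm hxb

-- ===== the sweep computes the cardinality of the union =====

theorem sweep_go (L : List (Int × Int)) (t lo hi : Int)
    (hord : ∀ p ∈ L, lo ≤ p.1)
    (hpair : L.Pairwise (fun p q => p.1 ≤ q.1))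
    (hne : ∀ p ∈ L, p.1 ≤ p.2)
    (hlohi : lo ≤ hi) :
    pvSweepFinish (L.foldl pvSweepStep (t, some (lo, hi))) =
      t + ((Finset.Icc lo hi ∪ pvFU L).card : Int) := by
  induction L generalizing t lo hi with
  | nil =>
    show t + (hi - lo + 1) = _
    simp only [pvFU, List.foldr_nil, Finset.union_empty, Int.card_Icc]
    omega
  | cons ab L ih =>
    obtain ⟨a, b⟩ := ab
    have ha : lo ≤ a := hord (a, b) (by simp)
    have hab : a ≤ b := hne (a, b) (by simp)
    rw [List.pairwise_cons] at hpair
    rw [List.foldl_cons]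
    show pvSweepFinish (L.foldl pvSweepStep
      (if a ≤ hi + 1 then (t, some (lo, max hi b)) else (t + (hi - lo + 1), some (a, b)))) = _
    have hFU : pvFU ((a, b) :: L) = Finset.Icc a b ∪ pvFU L := by
      show pvIcc a b ∪ pvFU L = _
      rw [pvIcc_eq_Icc]
    by_cases hc : a ≤ hi + 1
    · rw [if_pos hc]
      rw [ih t lo (max hi b) (fun p hp => hord p (by simp [hp])) hpair.2
        (fun p hp => hne p (by simp [hp])) (le_trans hlohi (le_max_left _ _))]
      rw [hFU]
      refine congrArg (fun s : Finset Int => t + (s.card : Int)) ?_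
      ext x
      simp only [Finset.mem_union, Finset.mem_Icc]
      by_cases hF : x ∈ pvFU L
      · simp [hF]
      · simp only [hF, or_false]
        rcases le_total hi b with hm | hm
        · rw [max_eq_right hm]; constructor
          · rintro ⟨hx1, hx2⟩
            by_cases h3 : hi < x
            · exact Or.inr ⟨by omega, hx2⟩
            · exact Or.inl ⟨hx1, by omega⟩
          · rintro (⟨hx1, hx2⟩ | ⟨hx1, hx2⟩) <;> exact ⟨by omega, by omega⟩
        · rw [max_eq_left hm]; constructor
          · rintro ⟨hx1, hx2⟩; exact Or.inl ⟨hx1, hx2⟩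
          · rintro (⟨hx1, hx2⟩ | ⟨hx1, hx2⟩) <;> exact ⟨by omega, by omega⟩
    · rw [if_neg hc]
      have hord' : ∀ p ∈ L, a ≤ p.1 := hpair.1
      rw [ih (t + (hi - lo + 1)) a b hord' hpair.2 (fun p hp => hne p (by simp [hp])) hab]
      have hdisj : Disjoint (Finset.Icc lo hi) (Finset.Icc a b ∪ pvFU L) := by
        rw [Finset.disjoint_left]
        intro x hx hx'
        rw [Finset.mem_Icc] at hx
        rcases Finset.mem_union.mp hx' with h | h
        · rw [Finset.mem_Icc] at h; omega
        · rw [mem_pvFU] at h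
          obtain ⟨p, hp, hx1, _⟩ := h
          have := hord' p hp
          omega
      rw [hFU, Finset.card_union_of_disjoint hdisj]
      push_cast
      rw [Int.card_Icc]
      omega

theorem sweep_top (L : List (Int × Int))
    (hpair : L.Pairwise (fun p q => p.1 ≤ q.1))
    (hne : ∀ p ∈ L, p.1 ≤ p.2) :
    pvSweepFinish (L.foldl pvSweepStep (0, none)) = ((pvFU L).card : Int) := by
  cases L with
  | nil => show (0 : Int) = _; simp [pvFU]
  | cons ab L =>
    obtain ⟨a, b⟩ := ab
    rw [List.pairwise_cons] at hpair
    rw [List.foldl_cons]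
    show pvSweepFinish (L.foldl pvSweepStep (0, some (a, b))) = _
    rw [sweep_go L 0 a b hpair.1 hpair.2 (fun p hp => hne p (by simp [hp]))
      (hne (a, b) (by simp))]
    have hFU : pvFU ((a, b) :: L) = Finset.Icc a b ∪ pvFU L := by
      show pvIcc a b ∪ pvFU L = _
      rw [pvIcc_eq_Icc]
    rw [hFU]
    omega

-- ===== unfolding the two ports =====

theorem part_one_eq (positions : List (List Int)) (debug : Int) :
    part_one positions debug =
      (((PySem.Set.ofList (positions.flatMap (pvLA debug))).filter
        (fun ip => ip.2 == debug)).length : Int) := by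
  unfold part_one
  dsimp only
  refine congrArg (fun l : List (Int × Int) =>
    (((PySem.Set.ofList l).filter (fun ip => ip.2 == debug)).length : Int)) ?_
  refine (PySem.List.foldl_congr_mem _ _ (fun acc row => acc ++ pvLA debug row) _ ?_).trans ?_
  · intro acc row _
    rcases row with _ | ⟨a, _ | ⟨b, _ | ⟨c, _ | ⟨d, _ | ⟨e, t⟩⟩⟩⟩⟩ <;> simp [pvLA]
  · rw [PySem.List.foldl_append_eq_flatMap, List.nil_append]

theorem part_one_alt_eq (positions : List (List Int)) (debug : Int) :
    part_one_alt positions debug =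
      pvSweepFinish ((PySem.List.sorted (positions.flatMap (pvSegsRow debug))
        (fun s => s.1)).foldl pvSweepStep (0, none)) := by
  unfold part_one_alt
  dsimp only
  refine congrArg (fun l : List (Int × Int) =>
    pvSweepFinish ((PySem.List.sorted l (fun s => s.1)).foldl pvSweepStep (0, none))) ?_
  refine (PySem.List.foldl_congr_mem _ _ (fun acc row => acc ++ pvSegsRow debug row) _ ?_).trans ?_
  · intro acc row _
    rcases row with _ | ⟨a, _ | ⟨b, _ | ⟨c, _ | ⟨d, _ | ⟨e, t⟩⟩⟩⟩⟩ <;>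
      dsimp only [pvSegsRow, pvUnpack4] <;> try simp
    split_ifs <;> simp_all [pvHoles]
  · rw [PySem.List.foldl_append_eq_flatMap, List.nil_append]

-- a member of the big A-list always carries debug as second component
theorem snd_eq_debug (positions : List (List Int)) (debug : Int) (p : Int × Int)
    (hp : p ∈ positions.flatMap (pvLA debug)) : p.2 = debug := by
  rw [List.mem_flatMap] at hp
  obtain ⟨row, _, hp⟩ := hp
  obtain ⟨x, y⟩ := p
  rcases row with _ | ⟨a, _ | ⟨b, _ | ⟨c, _ | ⟨d, _ | ⟨e, t⟩⟩⟩⟩⟩ <;>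
    try (simp [pvLA] at hp; done)
  exact ((mem_pvLA debug a b c d x y).mp hp).1

theorem length_ofList_eq_card (l : List (Int × Int)) :
    (PySem.Set.ofList l).length = l.toFinset.card := by
  have hn := PySem.Set.nodup_ofList l
  have : (PySem.Set.ofList l).toFinset = l.toFinset := by
    ext p
    simp [PySem.Set.mem_ofList]
  rw [← this, List.toFinset_card_of_nodup hn]

-- ===== assembly =====

theorem main_equiv (positions : List (List Int)) (debug : Int) :
    part_one positions debug = part_one_alt positions debug := by
  rw [part_one_eq, part_one_alt_eq]
  set L := positions.flatMap (pvSegsRow debug) with hL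
  set LS := PySem.List.sorted L (fun s : Int × Int => s.1) with hLS
  have hperm : LS.Perm L := PySem.List.sorted_perm L _ _
  have hpair : LS.Pairwise (fun p q : Int × Int => p.1 ≤ q.1) :=
    PySem.List.sorted_pairwise L (fun s : Int × Int => s.1)
  have hneL : ∀ p ∈ L, p.1 ≤ p.2 := by
    intro p hp
    rw [hL, List.mem_flatMap] at hp
    obtain ⟨row, _, hp⟩ := hp
    exact ne_pvSegsRow debug row p hp
  have hneLS : ∀ p ∈ LS, p.1 ≤ p.2 := fun p hp => hneL p (hperm.mem_iff.mp hp)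
  rw [sweep_top LS hpair hneLS]
  have hFU : pvFU LS = pvFU L := by
    ext x
    rw [mem_pvFU, mem_pvFU]
    unfold pvInU
    constructor
    · rintro ⟨p, hp, hx⟩; exact ⟨p, hperm.mem_iff.mp hp, hx⟩
    · rintro ⟨p, hp, hx⟩; exact ⟨p, hperm.mem_iff.mpr hp, hx⟩
  rw [hFU]
  have hfilter : ((PySem.Set.ofList (positions.flatMap (pvLA debug))).filter
      (fun ip => ip.2 == debug)) = PySem.Set.ofList (positions.flatMap (pvLA debug)) := by
    apply List.filter_eq_self.mpr
    intro p hp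
    have := snd_eq_debug positions debug p
      ((PySem.Set.mem_ofList _ _).mp hp)
    simp [this]
  rw [hfilter, length_ofList_eq_card]
  congr 1
  have himg : (positions.flatMap (pvLA debug)).toFinset =
      (pvFU L).image (fun x => (x, debug)) := by
    ext p
    obtain ⟨x, y⟩ := p
    simp only [List.mem_toFinset, Finset.mem_image, mem_pvFU]
    constructor
    · intro hp
      rw [List.mem_flatMap] at hp
      obtain ⟨row, hrow, hp⟩ := hp
      rcases row with _ | ⟨a, _ | ⟨b, _ | ⟨c, _ | ⟨d, _ | ⟨e, t⟩⟩⟩⟩⟩ <;>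
        try (simp [pvLA] at hp; done)
      obtain ⟨rfl, hin⟩ := (row_equiv debug a b c d x y).mp hp
      refine ⟨x, ?_, rfl⟩
      rw [hL]
      unfold pvInU at hin ⊢
      obtain ⟨p, hp2, hx⟩ := hin
      exact ⟨p, List.mem_flatMap.mpr ⟨_, hrow, hp2⟩, hx⟩
    · rintro ⟨x', hx', heq⟩
      rw [← heq]
      rw [hL] at hx'
      unfold pvInU at hx'
      obtain ⟨p, hp, hx⟩ := hx'
      rw [List.mem_flatMap] at hp
      obtain ⟨row, hrow, hp⟩ := hp
      rw [List.mem_flatMap]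
      refine ⟨row, hrow, ?_⟩
      rcases row with _ | ⟨a, _ | ⟨b, _ | ⟨c, _ | ⟨d, _ | ⟨e, t⟩⟩⟩⟩⟩ <;>
        try (simp [pvSegsRow] at hp; done)
      exact (row_equiv debug a b c d x' debug).mpr ⟨rfl, ⟨p, hp, hx⟩⟩
  rw [himg, Finset.card_image_of_injective]
  intro a b hab
  exact congrArg Prod.fst hab

-- ===== VERDICT (by name: the statement is the Claim_ definition above) =====
theorem part_one_spec : Claim_equal_part_one := by
  intro positions debug _ _
  unfold Spec_part_one
  exact main_equiv positions debug
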